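-- pv_equiv track=rewrite | github.com/DengWen0425/Artificial-Intelligence | final-gomoku/mcts/mct.py | get_radius_moves
-- ===== SOURCE A (Python) =====
-- def get_radius_moves(_board, position, radius=1):
--     x, y = position
--     x_s, y_s = (x - radius, y - radius)
--     actions = []
--     for i in range(2 * radius + 1):
--         for j in range(2 * radius + 1):
--             x_0 = x_s + i
--             y_0 = y_s + j
--             if 20 > x_0 >= 0 and 20 > y_0 >= 0:
--                 actions.append((x_0, y_0))
--     return actions
-- ===== SOURCE B (Python) =====
-- def get_radius_moves(_board, position, radius=1):
--     x, y = position
--     return [divmod(k, 20) for k in range(400)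
--             if abs(k // 20 - x) <= radius and abs(k % 20 - y) <= radius]
-- ===== Notes on version B (the rewrite author's own statement) =====
-- stated objective: alternative
-- what changed: B makes one flat pass over the 400 board cells via a flattened index decoded with divmod(k, 20), keeping cells within Chebyshev distance radius of the position, instead of A's nested scan of the (2*radius+1)^2 square with a per-cell board-bounds test.
import Mathlib
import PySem

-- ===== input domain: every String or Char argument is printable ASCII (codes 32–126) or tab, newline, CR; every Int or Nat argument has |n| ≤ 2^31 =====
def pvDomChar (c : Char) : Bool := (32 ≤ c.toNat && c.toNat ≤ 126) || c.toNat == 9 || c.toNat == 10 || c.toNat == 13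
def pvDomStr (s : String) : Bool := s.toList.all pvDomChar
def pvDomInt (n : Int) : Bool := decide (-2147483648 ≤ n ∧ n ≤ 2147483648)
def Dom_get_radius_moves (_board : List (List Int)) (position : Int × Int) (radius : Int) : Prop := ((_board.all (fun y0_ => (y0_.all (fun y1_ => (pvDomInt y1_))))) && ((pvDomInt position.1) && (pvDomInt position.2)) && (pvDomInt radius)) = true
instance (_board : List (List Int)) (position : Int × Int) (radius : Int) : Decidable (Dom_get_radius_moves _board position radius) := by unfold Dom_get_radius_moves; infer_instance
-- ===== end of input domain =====

-- B scans the fixed 20x20 board once through a flattened cell index (decoded with divmod) and keeps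
-- the cells within Chebyshev distance `radius` of the position, instead of A's scan of the
-- (2*radius+1)^2 square with a per-cell board-bounds test (alternative decomposition).

-- ===== PORT A =====
-- literal port: for i in range(2r+1): for j in range(2r+1): append if in bounds
def get_radius_moves (_board : List (List Int)) (position : Int × Int) (radius : Int) : List (Int × Int) :=
  let x := position.1
  let y := position.2
  let x_s := x - radius
  let y_s := y - radius
  (PySem.List.pyRange 0 (2 * radius + 1) 1).foldl
    (fun actions i =>
      (PySem.List.pyRange 0 (2 * radius + 1) 1).foldl
        (fun actions j =>
          let x_0 := x_s + i
          let y_0 := y_s + j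
          if (x_0 < 20 ∧ 0 ≤ x_0) ∧ (y_0 < 20 ∧ 0 ≤ y_0) then actions ++ [(x_0, y_0)]
          else actions)
        actions)
    []

-- ===== PORT B =====
-- one flat pass over the 400 board cells, k decoded as divmod(k, 20), kept if within Chebyshev radius
def get_radius_moves_alt (_board : List (List Int)) (position : Int × Int) (radius : Int) : List (Int × Int) :=
  let x := position.1
  let y := position.2
  (PySem.List.pyRange 0 400 1).flatMap
    (fun k =>
      if |PySem.Int.floordiv k 20 - x| ≤ radius ∧ |PySem.Int.mod k 20 - y| ≤ radius then
        [(PySem.Int.floordiv k 20, PySem.Int.mod k 20)]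
      else [])

-- ===== PRECONDITION & SPEC =====
def Spec_get_radius_moves (_board : List (List Int)) (position : Int × Int) (radius : Int) (out : List (Int × Int)) : Prop := out = get_radius_moves_alt _board position radius
instance (_board : List (List Int)) (position : Int × Int) (radius : Int) (out : List (Int × Int)) : Decidable (Spec_get_radius_moves _board position radius out) := by unfold Spec_get_radius_moves; infer_instance

-- ===== CLAIM (what is proved, stated in full; the proofs are below) =====
def Claim_equal_get_radius_moves : Prop := ∀ (_board : List (List Int)) (position : Int × Int) (radius : Int), Dom_get_radius_moves _board position radius → Spec_get_radius_moves _board position radius (get_radius_moves _board position radius)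

-- ===== LEMMAS AND PROOFS =====

-- both ports are reduced to this common clamped-rectangle normal form
def canonRM (x y radius : Int) : List (Int × Int) :=
  (PySem.List.pyRange (max 0 (x - radius)) (min 20 (x + radius + 1)) 1).flatMap
    (fun x0 => (PySem.List.pyRange (max 0 (y - radius)) (min 20 (y + radius + 1)) 1).map
      (fun y0 => (x0, y0)))

-- shifting a unit range: adding s to every element shifts both bounds
theorem pyRange_one_map_add (s a b : Int) :
    (PySem.List.pyRange a b 1).map (fun t => s + t) = PySem.List.pyRange (s + a) (s + b) 1 := by
  rw [PySem.List.pyRange_one, PySem.List.pyRange_one, List.map_map]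
  have h : s + b - (s + a) = b - a := by ring
  rw [h]
  congr 1
  funext k
  simp [Function.comp]
  ring

-- filtering a unit range by an interval predicate is a clamped unit range
theorem filter_pyRange_interval (lo hi : Int) : ∀ (a b : Int),
    (PySem.List.pyRange a b 1).filter (fun t => decide (lo ≤ t ∧ t < hi))
      = PySem.List.pyRange (max a lo) (min b hi) 1 := by
  intro a b
  by_cases hab : b ≤ a
  · rw [PySem.List.pyRange_one_eq_nil hab, PySem.List.pyRange_one_eq_nil (by omega)]
    rfl
  · have hab : a < b := by omega
    have hlen : ((b - (a+1)).toNat) < ((b - a).toNat) := by omega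
    rw [PySem.List.pyRange_one_cons hab, List.filter_cons]
    rw [filter_pyRange_interval lo hi (a+1) b]
    by_cases hc : lo ≤ a ∧ a < hi
    · have h1 : max a lo = a := by omega
      have h2 : a < min b hi := by omega
      rw [h1, PySem.List.pyRange_one_cons h2]
      have h3 : max (a+1) lo = a + 1 := by omega
      simp [hc, h3]
    · have hd : (decide (lo ≤ a ∧ a < hi)) = false := by simpa using hc
      rw [hd]
      simp only [Bool.false_eq_true, if_false]
      by_cases hla : a < lo
      · have : max (a+1) lo = max a lo := by omega
        rw [this]
      · -- lo ≤ a, so hi ≤ a: both ranges empty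
        have hha : hi ≤ a := by omega
        rw [PySem.List.pyRange_one_eq_nil (by omega), PySem.List.pyRange_one_eq_nil (by omega)]
termination_by a b => (b - a).toNat

-- flatMap with a guard equals filter then flatMap
theorem flatMap_ite_eq_filter {α β : Type} (P : α → Prop) [DecidablePred P] (F : α → List β) :
    ∀ (l : List α),
      l.flatMap (fun t => if P t then F t else [])
        = (l.filter (fun t => decide (P t))).flatMap F
  | [] => rfl
  | t :: l => by
    rw [List.flatMap_cons, List.filter_cons]
    by_cases h : P t
    · simp only [h, if_true, decide_true, List.flatMap_cons]
      rw [flatMap_ite_eq_filter P F l]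
    · simp only [h, if_false, decide_false, Bool.false_eq_true]
      simpa using flatMap_ite_eq_filter P F l

-- flatMap of a one-element producer is a map
theorem flatMap_singleton_eq_map {α β : Type} (f : α → β) :
    ∀ (l : List α), l.flatMap (fun a => [f a]) = l.map f
  | [] => rfl
  | a :: l => by
    rw [List.flatMap_cons, List.map_cons, flatMap_singleton_eq_map f l]
    rfl

-- the flattened index range [0, 400) decomposed row-major into 20*a + b
set_option maxRecDepth 10000 in
theorem range400_decomp :
    PySem.List.pyRange 0 400 1
      = (PySem.List.pyRange 0 20 1).flatMap
          (fun a => (PySem.List.pyRange 0 20 1).map (fun b => 20 * a + b)) := by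
  decide

theorem A_eq_canon (_board : List (List Int)) (position : Int × Int) (radius : Int) :
    get_radius_moves _board position radius = canonRM position.1 position.2 radius := by
  unfold get_radius_moves canonRM
  set x := position.1
  set y := position.2
  set n : Int := 2 * radius + 1 with hn
  set x_s := x - radius with hxs
  set y_s := y - radius with hys
  -- inner loop → filter+map, outer loop → flatMap
  have hinner : ∀ (i : Int) (acc : List (Int × Int)),
      (PySem.List.pyRange 0 n 1).foldl
        (fun actions j =>
          if (x_s + i < 20 ∧ 0 ≤ x_s + i) ∧ (y_s + j < 20 ∧ 0 ≤ y_s + j) then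
            actions ++ [(x_s + i, y_s + j)]
          else actions) acc
      = acc ++ (if 0 ≤ x_s + i ∧ x_s + i < 20 then
          (PySem.List.pyRange (max 0 (y - radius)) (min 20 (y + radius + 1)) 1).map
            (fun y0 => (x_s + i, y0))
        else []) := by
    intro i acc
    rw [PySem.List.foldl_append_ite
        (p := fun j => (x_s + i < 20 ∧ 0 ≤ x_s + i) ∧ (y_s + j < 20 ∧ 0 ≤ y_s + j))
        (f := fun j => (x_s + i, y_s + j))]
    congr 1
    by_cases hx : 0 ≤ x_s + i ∧ x_s + i < 20
    · rw [if_pos hx]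
      have hfe : (PySem.List.pyRange 0 n 1).filter
            (fun j => decide ((x_s + i < 20 ∧ 0 ≤ x_s + i) ∧ (y_s + j < 20 ∧ 0 ≤ y_s + j)))
          = (PySem.List.pyRange 0 n 1).filter
            (fun j => decide ((-y_s) ≤ j ∧ j < 20 - y_s)) := by
        apply List.filter_congr
        intro j _
        simp only [decide_eq_decide]
        constructor <;> intro h <;> [exact ⟨by omega, by omega⟩; exact ⟨⟨by omega, hx.1⟩, by omega, by omega⟩]
      rw [hfe, filter_pyRange_interval]
      have hmap : (PySem.List.pyRange (max 0 (-y_s)) (min n (20 - y_s)) 1).map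
            (fun j => (x_s + i, y_s + j))
          = ((PySem.List.pyRange (max 0 (-y_s)) (min n (20 - y_s)) 1).map
              (fun t => y_s + t)).map (fun y0 => (x_s + i, y0)) := by
        rw [List.map_map]; rfl
      rw [hmap, pyRange_one_map_add]
      have h1 : y_s + max 0 (-y_s) = max 0 (y - radius) := by omega
      have h2 : y_s + min n (20 - y_s) = min 20 (y + radius + 1) := by omega
      rw [h1, h2]
    · rw [if_neg hx]
      rw [List.filter_eq_nil_iff.mpr ?_, List.map_nil]
      intro j _
      simp only [decide_eq_true_eq]
      intro h
      exact hx ⟨h.1.2, h.1.1⟩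
  calc (PySem.List.pyRange 0 n 1).foldl
        (fun actions i =>
          (PySem.List.pyRange 0 n 1).foldl
            (fun actions j =>
              if (x_s + i < 20 ∧ 0 ≤ x_s + i) ∧ (y_s + j < 20 ∧ 0 ≤ y_s + j) then
                actions ++ [(x_s + i, y_s + j)]
              else actions) actions) []
      = (PySem.List.pyRange 0 n 1).foldl
          (fun actions i => actions ++ (if 0 ≤ x_s + i ∧ x_s + i < 20 then
            (PySem.List.pyRange (max 0 (y - radius)) (min 20 (y + radius + 1)) 1).map
              (fun y0 => (x_s + i, y0))
          else [])) [] := by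
        apply PySem.List.foldl_congr_mem
        intro acc i _
        exact hinner i acc
    _ = (PySem.List.pyRange 0 n 1).flatMap
          (fun i => if 0 ≤ x_s + i ∧ x_s + i < 20 then
            (PySem.List.pyRange (max 0 (y - radius)) (min 20 (y + radius + 1)) 1).map
              (fun y0 => (x_s + i, y0))
          else []) := by
        rw [PySem.List.foldl_append_eq_flatMap]; rfl
    _ = ((PySem.List.pyRange 0 n 1).map (fun t => x_s + t)).flatMap
          (fun x0 => if 0 ≤ x0 ∧ x0 < 20 then
            (PySem.List.pyRange (max 0 (y - radius)) (min 20 (y + radius + 1)) 1).map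
              (fun y0 => (x0, y0))
          else []) := by
        rw [List.flatMap_map]
    _ = (PySem.List.pyRange x_s (x_s + n) 1).flatMap
          (fun x0 => if 0 ≤ x0 ∧ x0 < 20 then
            (PySem.List.pyRange (max 0 (y - radius)) (min 20 (y + radius + 1)) 1).map
              (fun y0 => (x0, y0))
          else []) := by
        rw [pyRange_one_map_add, add_zero]
    _ = ((PySem.List.pyRange x_s (x_s + n) 1).filter
          (fun x0 => decide (0 ≤ x0 ∧ x0 < 20))).flatMap
          (fun x0 => (PySem.List.pyRange (max 0 (y - radius)) (min 20 (y + radius + 1)) 1).map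
              (fun y0 => (x0, y0))) := by
        rw [flatMap_ite_eq_filter]
    _ = (PySem.List.pyRange (max 0 (x - radius)) (min 20 (x + radius + 1)) 1).flatMap
          (fun x0 => (PySem.List.pyRange (max 0 (y - radius)) (min 20 (y + radius + 1)) 1).map
              (fun y0 => (x0, y0))) := by
        rw [filter_pyRange_interval]
        have h1 : max x_s 0 = max 0 (x - radius) := by omega
        have h2 : min (x_s + n) 20 = min 20 (x + radius + 1) := by omega
        rw [h1, h2]

theorem B_eq_canon (_board : List (List Int)) (position : Int × Int) (radius : Int) :
    get_radius_moves_alt _board position radius = canonRM position.1 position.2 radius := by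
  unfold get_radius_moves_alt canonRM
  set x := position.1
  set y := position.2
  rw [range400_decomp, List.flatMap_assoc]
  simp only [List.flatMap_map]
  have hstep : ∀ a ∈ PySem.List.pyRange 0 20 1,
      (PySem.List.pyRange 0 20 1).flatMap (fun b =>
        if |PySem.Int.floordiv (20 * a + b) 20 - x| ≤ radius ∧
           |PySem.Int.mod (20 * a + b) 20 - y| ≤ radius then
          [(PySem.Int.floordiv (20 * a + b) 20, PySem.Int.mod (20 * a + b) 20)]
        else [])
      = if x - radius ≤ a ∧ a < x + radius + 1 then
          (PySem.List.pyRange (max 0 (y - radius)) (min 20 (y + radius + 1)) 1).map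
            (fun y0 => (a, y0))
        else [] := by
    intro a _
    have hbody : ∀ b ∈ PySem.List.pyRange 0 20 1,
        (if |PySem.Int.floordiv (20 * a + b) 20 - x| ≤ radius ∧
            |PySem.Int.mod (20 * a + b) 20 - y| ≤ radius then
          [(PySem.Int.floordiv (20 * a + b) 20, PySem.Int.mod (20 * a + b) 20)]
        else [])
        = (if (x - radius ≤ a ∧ a < x + radius + 1) ∧ (y - radius ≤ b ∧ b < y + radius + 1) then
            [(a, b)]
          else []) := by
      intro b hb
      rw [PySem.List.mem_pyRange_one] at hb
      have hd : PySem.Int.floordiv (20 * a + b) 20 = a := by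
        rw [PySem.Int.floordiv_eq_ediv_of_pos (by omega : (0:Int) < 20)]
        omega
      have hm : PySem.Int.mod (20 * a + b) 20 = b := by
        rw [PySem.Int.mod_eq_emod_of_pos (by omega : (0:Int) < 20)]
        omega
      rw [hd, hm]
      have hiff : (|a - x| ≤ radius ∧ |b - y| ≤ radius)
          ↔ ((x - radius ≤ a ∧ a < x + radius + 1) ∧ (y - radius ≤ b ∧ b < y + radius + 1)) := by
        rw [abs_le, abs_le]
        omega
      simp only [hiff]
    rw [List.flatMap_congr hbody]
    by_cases hC : x - radius ≤ a ∧ a < x + radius + 1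
    · rw [if_pos hC]
      have hred : ∀ b ∈ PySem.List.pyRange 0 20 1,
          (if (x - radius ≤ a ∧ a < x + radius + 1) ∧ (y - radius ≤ b ∧ b < y + radius + 1) then
            ([(a, b)] : List (Int × Int))
          else [])
          = (if y - radius ≤ b ∧ b < y + radius + 1 then [(a, b)] else []) := by
        intro b _
        simp only [hC, true_and]
      rw [List.flatMap_congr hred,
          flatMap_ite_eq_filter (fun b => y - radius ≤ b ∧ b < y + radius + 1) (fun b => [(a, b)]),
          filter_pyRange_interval,
          flatMap_singleton_eq_map (fun b => (a, b))]
    · rw [if_neg hC]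
      have hnil : ∀ b ∈ PySem.List.pyRange 0 20 1,
          (if (x - radius ≤ a ∧ a < x + radius + 1) ∧ (y - radius ≤ b ∧ b < y + radius + 1) then
            ([(a, b)] : List (Int × Int))
          else [])
          = [] := by
        intro b _
        rw [if_neg (by tauto)]
      rw [List.flatMap_congr hnil]
      simp
  rw [List.flatMap_congr hstep,
      flatMap_ite_eq_filter (fun a => x - radius ≤ a ∧ a < x + radius + 1),
      filter_pyRange_interval]

-- ===== VERDICT (by name: the statement is the Claim_ definition above) =====
theorem get_radius_moves_spec : Claim_equal_get_radius_moves := by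
  intro _board position radius _
  unfold Spec_get_radius_moves
  rw [A_eq_canon, B_eq_canon]
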